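-- pv_equiv track=rewrite | github.com/ncusi/PatchScope | src/diffannotator/test.py | fill_gaps_with_previous_value
-- ===== SOURCE A (Python) =====
-- def fill_gaps_with_previous_value(d):
--     if not d:
--         return {}
--
--     # Find the minimum and maximum keys
--     min_key = min(d.keys())
--     max_key = max(d.keys())
--
--     # Create a new dictionary to store the result
--     filled_dict = {}
--
--     # Initialize the previous value
--     previous_value = None
--
--     # Iterate through the range of keys
--     for key in range(min_key, max_key + 1):
--         if key in d:
--             previous_value = d[key]
--         filled_dict[key] = previous_value
--
--     return filled_dict
-- ===== SOURCE B (Python) =====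
-- def fill_gaps_with_previous_value(d):
--     if not d:
--         return {}
--     keys = sorted(d)
--     out = {}
--     # fill each span [key, next_key) in one shot; the last key fills just itself
--     for k, nxt in zip(keys, keys[1:] + [keys[-1] + 1]):
--         v = d[k]
--         for j in range(k, nxt):
--             out[j] = v
--     return out
-- ===== Notes on version B (the rewrite author's own statement) =====
-- stated objective: alternative
-- what changed: Instead of scanning every integer of the full range and testing dict membership at each one, B sorts the keys once and fills each span between consecutive sorted keys in one shot with that key's value.
import Mathlib
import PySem

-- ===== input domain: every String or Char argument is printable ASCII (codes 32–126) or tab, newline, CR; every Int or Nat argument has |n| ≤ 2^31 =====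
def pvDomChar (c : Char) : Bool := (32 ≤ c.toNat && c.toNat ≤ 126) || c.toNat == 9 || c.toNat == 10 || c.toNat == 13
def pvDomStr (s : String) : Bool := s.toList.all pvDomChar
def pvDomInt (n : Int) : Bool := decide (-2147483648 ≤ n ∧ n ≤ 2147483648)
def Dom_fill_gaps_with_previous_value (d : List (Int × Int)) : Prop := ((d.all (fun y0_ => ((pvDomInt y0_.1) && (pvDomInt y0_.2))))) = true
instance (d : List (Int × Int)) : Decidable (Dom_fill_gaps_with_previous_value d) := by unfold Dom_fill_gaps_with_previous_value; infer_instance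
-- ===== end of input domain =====

-- B fills each span between consecutive sorted keys in one shot instead of testing
-- membership at every integer of the range (objective: alternative decomposition).


-- ===== PORT A =====
-- loop body of A's 'for key in range(min_key, max_key + 1)'; state = (filled_dict, previous_value)
def fgStepA (dd : PySem.Dict Int Int) (st : PySem.Dict Int Int × Option Int) (key : Int) :
    PySem.Dict Int Int × Option Int :=
  let previous_value : Option Int := if dd.contains key then some (dd.getD key 0) else st.2
  -- filled_dict[key] = previous_value; the first key of the range is min_key, a key of d,
  -- so previous_value is never none when stored and '.getD 0' is unreachable
  (st.1.insert key (previous_value.getD 0), previous_value)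

def fill_gaps_with_previous_value (d : List (Int × Int)) : List (Int × Int) :=
  match d with
  | [] => []
  | p :: rest =>
    let dd := PySem.Dict.mk (p :: rest)
    -- min(d.keys()) / max(d.keys()) over the nonempty key list, as Python's running fold
    let min_key := (rest.map Prod.fst).foldl min p.1
    let max_key := (rest.map Prod.fst).foldl max p.1
    ((PySem.List.pyRange min_key (max_key + 1) 1).foldl (fgStepA dd)
      (PySem.Dict.empty, none)).1.items

-- ===== PORT B =====
-- body of B's outer loop: fill the span [k, nxt) with d[k]
def fgStepB (dd : PySem.Dict Int Int) (out : PySem.Dict Int Int) (kn : Int × Int) :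
    PySem.Dict Int Int :=
  let v := dd.getD kn.1 0
  (PySem.List.pyRange kn.1 kn.2 1).foldl (fun out j => out.insert j v) out

def fill_gaps_with_previous_value_alt (d : List (Int × Int)) : List (Int × Int) :=
  match d with
  | [] => []
  | _ :: _ =>
    let dd := PySem.Dict.mk d
    let keys := PySem.List.sorted (d.map Prod.fst) (fun x => x) false
    let bounds := PySem.List.slice keys (some 1) none ++ [PySem.List.pyGetD keys (-1) 0 + 1]
    ((keys.zip bounds).foldl (fgStepB dd) PySem.Dict.empty).items

-- ===== PRECONDITION & SPEC =====
-- A Python dict has unique keys; Pre_ excludes association lists with duplicate keys,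
-- which do not represent any Python dict input.
def Pre_fill_gaps_with_previous_value (d : List (Int × Int)) : Prop := (d.map Prod.fst).Nodup
instance (d : List (Int × Int)) : Decidable (Pre_fill_gaps_with_previous_value d) := by unfold Pre_fill_gaps_with_previous_value; infer_instance
def pvWitness_fill_gaps_with_previous_value : (List (Int × Int)) := [(1, 10), (4, 40)]

def Spec_fill_gaps_with_previous_value (d : List (Int × Int)) (out : List (Int × Int)) : Prop := out = fill_gaps_with_previous_value_alt d
instance (d : List (Int × Int)) (out : List (Int × Int)) : Decidable (Spec_fill_gaps_with_previous_value d out) := by unfold Spec_fill_gaps_with_previous_value; infer_instance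

-- ===== CLAIM (what is proved, stated in full; the proofs are below) =====
def Claim_equal_fill_gaps_with_previous_value : Prop := ∀ (d : List (Int × Int)), Dom_fill_gaps_with_previous_value d → Pre_fill_gaps_with_previous_value d → Spec_fill_gaps_with_previous_value d (fill_gaps_with_previous_value d)

-- ===== LEMMAS AND PROOFS =====

-- the common reference value: for sorted keys k₀ < k₁ < …, the items list is the
-- concatenation of the spans [kᵢ, kᵢ₊₁) (the last span running to E), each mapped to kᵢ's value
def fillFrom (dd : PySem.Dict Int Int) : List Int → Int → List (Int × Int)
  | [], _ => []
  | k :: rest, E =>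
    (PySem.List.pyRange k (match rest with | [] => E | k' :: _ => k') 1).map
        (fun j => (j, dd.getD k 0))
      ++ fillFrom dd rest E

lemma fg_insert_run (v b : Int) : ∀ (n : Nat) (a : Int), (b - a).toNat = n →
    ∀ (acc : PySem.Dict Int Int), (∀ x ∈ acc.keys, x < a) →
    (PySem.List.pyRange a b 1).foldl (fun out j => out.insert j v) acc
      = PySem.Dict.mk (acc.items ++ (PySem.List.pyRange a b 1).map (fun j => (j, v))) := by
  intro n
  induction n with
  | zero =>
    intro a hn acc hacc
    rw [PySem.List.pyRange_one_eq_nil (by omega)]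
    simp only [List.foldl_nil, List.map_nil, List.append_nil]
  | succ n ih =>
    intro a hn acc hacc
    rw [PySem.List.pyRange_one_cons (by omega)]
    simp only [List.foldl_cons, List.map_cons]
    have hc : acc.contains a = false := by
      rcases h : acc.contains a with _ | _
      · rfl
      · exact absurd (hacc a ((PySem.Dict.contains_iff_mem_keys acc a).mp h)) (lt_irrefl a)
    have hins : acc.insert a v = PySem.Dict.mk (acc.items ++ [(a, v)]) := by
      apply PySem.Dict.ext
      rw [PySem.Dict.items_insert_of_not_contains acc v hc]
    rw [hins, ih (a + 1) (by omega)]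
    · simp
    · intro x hx
      simp only [PySem.Dict.keys, List.map_append] at hx
      rcases List.mem_append.mp hx with h1 | h1
      · exact lt_trans (hacc x h1) (by omega)
      · simp at h1; omega

lemma fg_stepA_run (dd : PySem.Dict Int Int) (v b : Int) : ∀ (n : Nat) (a : Int), (b - a).toNat = n →
    (∀ j, a ≤ j → j < b → dd.contains j = false) →
    ∀ (acc : PySem.Dict Int Int), (∀ x ∈ acc.keys, x < a) →
    (PySem.List.pyRange a b 1).foldl (fgStepA dd) (acc, some v)
      = (PySem.Dict.mk (acc.items ++ (PySem.List.pyRange a b 1).map (fun j => (j, v))), some v) := by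
  intro n
  induction n with
  | zero =>
    intro a hn hnc acc hacc
    rw [PySem.List.pyRange_one_eq_nil (by omega)]
    simp only [List.foldl_nil, List.map_nil, List.append_nil]
  | succ n ih =>
    intro a hn hnc acc hacc
    rw [PySem.List.pyRange_one_cons (by omega)]
    simp only [List.foldl_cons, List.map_cons]
    have hc : acc.contains a = false := by
      rcases h : acc.contains a with _ | _
      · rfl
      · exact absurd (hacc a ((PySem.Dict.contains_iff_mem_keys acc a).mp h)) (lt_irrefl a)
    have hstep : fgStepA dd (acc, some v) a = (PySem.Dict.mk (acc.items ++ [(a, v)]), some v) := by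
      simp only [fgStepA, hnc a le_rfl (by omega), if_neg (by simp : ¬ (false = true)), Option.getD_some]
      rw [Prod.mk.injEq]
      refine ⟨PySem.Dict.ext ?_, rfl⟩
      rw [PySem.Dict.items_insert_of_not_contains acc _ hc]
    rw [hstep, ih (a + 1) (by omega) (fun j h1 h2 => hnc j (by omega) h2)]
    · simp
    · intro x hx
      simp only [PySem.Dict.keys, List.map_append] at hx
      rcases List.mem_append.mp hx with h1 | h1
      · exact lt_trans (hacc x h1) (by omega)
      · simp at h1; omega

lemma fg_le_getLast : ∀ (l : List Int), l.Pairwise (· ≤ ·) → ∀ x ∈ l, ∀ (h : l ≠ []), x ≤ l.getLast h := by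
  intro l
  induction l with
  | nil => intro _ x hx; exact absurd hx (List.not_mem_nil)
  | cons a t ih =>
    intro hp x hx h
    rcases List.pairwise_cons.mp hp with ⟨ha, hpt⟩
    rcases List.mem_cons.mp hx with rfl | hxt
    · cases t with
      | nil => simp [List.getLast]
      | cons b t' =>
        rw [List.getLast_cons (by simp)]
        exact le_trans (ha _ (List.getLast_mem _)) (le_refl _)
    · cases t with
      | nil => exact absurd hxt (List.not_mem_nil)
      | cons b t' =>
        rw [List.getLast_cons (by simp)]
        exact ih hpt x hxt (by simp)

lemma fg_fillA_main (dd : PySem.Dict Int Int) (E : Int) : ∀ (ks : List Int) (k : Int),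
    (k :: ks).Pairwise (· < ·) →
    (∀ x ∈ k :: ks, dd.contains x = true) →
    (∀ j, k ≤ j → j < E → dd.contains j = true → j ∈ k :: ks) →
    (∀ x ∈ k :: ks, x < E) →
    ∀ (acc : PySem.Dict Int Int) (prev : Option Int), (∀ x ∈ acc.keys, x < k) →
    ((PySem.List.pyRange k E 1).foldl (fgStepA dd) (acc, prev)).1
      = PySem.Dict.mk (acc.items ++ fillFrom dd (k :: ks) E) := by
  intro ks
  induction ks with
  | nil =>
    intro k hpw hmem hcov hlt acc prev hacc
    have hkE : k < E := hlt k (by simp)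
    have hck : dd.contains k = true := hmem k (by simp)
    rw [PySem.List.pyRange_one_cons hkE, List.foldl_cons]
    have hca : acc.contains k = false := by
      rcases h : acc.contains k with _ | _
      · rfl
      · exact absurd (hacc k ((PySem.Dict.contains_iff_mem_keys acc k).mp h)) (lt_irrefl k)
    have hstep : fgStepA dd (acc, prev) k
        = (PySem.Dict.mk (acc.items ++ [(k, dd.getD k 0)]), some (dd.getD k 0)) := by
      simp only [fgStepA, hck]
      rw [Prod.mk.injEq]
      refine ⟨PySem.Dict.ext ?_, rfl⟩
      rw [PySem.Dict.items_insert_of_not_contains acc _ hca]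
      simp
    rw [hstep, fg_stepA_run dd (dd.getD k 0) E (E - (k+1)).toNat (k+1) rfl ?hnone _ ?hkeys]
    case hnone =>
      intro j h1 h2
      rcases h : dd.contains j with _ | _
      · rfl
      · have := hcov j (by omega) h2 h
        simp at this; omega
    case hkeys =>
      intro x hx
      simp only [PySem.Dict.keys, List.map_append] at hx
      rcases List.mem_append.mp hx with h1 | h1
      · exact lt_trans (hacc x h1) (by omega)
      · simp at h1; omega
    simp only [fillFrom]
    rw [PySem.List.pyRange_one_cons hkE]
    simp [List.append_assoc]
  | cons k' rest ih =>
    intro k hpw hmem hcov hlt acc prev hacc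
    have hkk' : k < k' := (List.pairwise_cons.mp hpw).1 k' (by simp)
    have hk'E : k' < E := hlt k' (by simp)
    have hck : dd.contains k = true := hmem k (by simp)
    have hca : acc.contains k = false := by
      rcases h : acc.contains k with _ | _
      · rfl
      · exact absurd (hacc k ((PySem.Dict.contains_iff_mem_keys acc k).mp h)) (lt_irrefl k)
    rw [PySem.List.pyRange_one_append k k' E (by omega) (by omega), List.foldl_append]
    rw [PySem.List.pyRange_one_cons hkk', List.foldl_cons]
    have hstep : fgStepA dd (acc, prev) k
        = (PySem.Dict.mk (acc.items ++ [(k, dd.getD k 0)]), some (dd.getD k 0)) := by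
      simp only [fgStepA, hck]
      rw [Prod.mk.injEq]
      refine ⟨PySem.Dict.ext ?_, rfl⟩
      rw [PySem.Dict.items_insert_of_not_contains acc _ hca]
      simp
    rw [hstep, fg_stepA_run dd (dd.getD k 0) k' (k' - (k+1)).toNat (k+1) rfl ?hnone2 _ ?hkeys2]
    case hnone2 =>
      intro j h1 h2
      rcases h : dd.contains j with _ | _
      · rfl
      · have hj := hcov j (by omega) (by omega) h
        rcases List.mem_cons.mp hj with rfl | hj2
        · omega
        · rcases List.mem_cons.mp hj2 with rfl | hj3
          · omega
          · have := (List.pairwise_cons.mp (List.pairwise_cons.mp hpw).2).1 j hj3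
            omega
    case hkeys2 =>
      intro x hx
      simp only [PySem.Dict.keys, List.map_append] at hx
      rcases List.mem_append.mp hx with h1 | h1
      · exact lt_trans (hacc x h1) (by omega)
      · simp at h1; omega
    rw [ih k' (List.pairwise_cons.mp hpw).2
        (fun x hx => hmem x (List.mem_cons_of_mem _ hx))
        (fun j h1 h2 h3 => by
          have hj := hcov j (by omega) h2 h3
          rcases List.mem_cons.mp hj with rfl | hj2
          · omega
          · exact hj2)
        (fun x hx => hlt x (List.mem_cons_of_mem _ hx))
        _ _ ?hkeys3]
    case hkeys3 =>
      intro x hx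
      simp only [PySem.Dict.keys, List.map_append, List.map_map] at hx
      rcases List.mem_append.mp hx with h1 | h1
      · rcases List.mem_append.mp h1 with h2 | h2
        · exact lt_trans (hacc x h2) (by omega)
        · simp at h2; omega
      · have h1' : x ∈ PySem.List.pyRange (k + 1) k' 1 := by simpa using h1
        have := PySem.List.mem_pyRange_one.mp h1'
        omega
    simp only [fillFrom]
    rw [PySem.List.pyRange_one_cons hkk']
    simp [List.append_assoc]

lemma fg_fillB_main (dd : PySem.Dict Int Int) (E : Int) : ∀ (ks : List Int) (k : Int),
    (k :: ks).Pairwise (· < ·) →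
    (∀ x ∈ k :: ks, x < E) →
    ∀ (acc : PySem.Dict Int Int), (∀ x ∈ acc.keys, x < k) →
    ((k :: ks).zip (ks ++ [E])).foldl (fgStepB dd) acc
      = PySem.Dict.mk (acc.items ++ fillFrom dd (k :: ks) E) := by
  intro ks
  induction ks with
  | nil =>
    intro k hpw hlt acc hacc
    simp only [List.nil_append, List.zip_cons_cons, List.zip_nil_right, List.foldl_cons, List.foldl_nil]
    show fgStepB dd acc (k, E) = _
    simp only [fgStepB]
    rw [fg_insert_run (dd.getD k 0) E (E - k).toNat k rfl acc hacc]
    simp [fillFrom]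
  | cons k' rest ih =>
    intro k hpw hlt acc hacc
    have hkk' : k < k' := (List.pairwise_cons.mp hpw).1 k' (by simp)
    simp only [List.cons_append, List.zip_cons_cons, List.foldl_cons]
    show ((k' :: rest).zip (rest ++ [E])).foldl (fgStepB dd) (fgStepB dd acc (k, k')) = _
    have hstep : fgStepB dd acc (k, k')
        = PySem.Dict.mk (acc.items ++ (PySem.List.pyRange k k' 1).map (fun j => (j, dd.getD k 0))) := by
      simp only [fgStepB]
      exact fg_insert_run (dd.getD k 0) k' (k' - k).toNat k rfl acc hacc
    rw [hstep, ih k' (List.pairwise_cons.mp hpw).2 (fun x hx => hlt x (List.mem_cons_of_mem _ hx)) _ ?hkeys]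
    case hkeys =>
      intro x hx
      simp only [PySem.Dict.keys, List.map_append, List.map_map] at hx
      rcases List.mem_append.mp hx with h1 | h1
      · exact lt_trans (hacc x h1) hkk'
      · have h1' : x ∈ PySem.List.pyRange k k' 1 := by simpa using h1
        have := PySem.List.mem_pyRange_one.mp h1'
        omega
    simp [fillFrom, List.append_assoc]

-- ===== VERDICT (by name: the statement is the Claim_ definition above) =====
theorem fill_gaps_with_previous_value_spec : Claim_equal_fill_gaps_with_previous_value := by
  intro d hdom hpre
  unfold Spec_fill_gaps_with_previous_value
  match d with
  | [] => rfl
  | p :: rest =>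
    simp only [fill_gaps_with_previous_value, fill_gaps_with_previous_value_alt]
    obtain ⟨k, ks, hs⟩ : ∃ k ks,
        PySem.List.sorted ((p :: rest).map Prod.fst) (fun x => x) false = k :: ks := by
      cases h : PySem.List.sorted ((p :: rest).map Prod.fst) (fun x => x) false with
      | nil => simp [PySem.List.sorted_eq_nil_iff] at h
      | cons a l => exact ⟨a, l, rfl⟩
    have hmem_iff : ∀ x : Int, x ∈ k :: ks ↔ x ∈ (p :: rest).map Prod.fst := by
      intro x; rw [← hs]; exact PySem.List.mem_sorted _ _ _ _
    have hple : (k :: ks).Pairwise (· ≤ ·) := by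
      have := PySem.List.sorted_pairwise ((p :: rest).map Prod.fst) (fun x => x)
      rw [hs] at this; exact this
    have hnd : (k :: ks).Nodup := by
      have hperm := PySem.List.sorted_perm ((p :: rest).map Prod.fst) (fun x => x) false
      rw [hs] at hperm
      exact hperm.nodup_iff.mpr hpre
    have hplt : (k :: ks).Pairwise (· < ·) :=
      (hple.and hnd).imp (fun h => lt_of_le_of_ne h.1 h.2)
    have hLne : (k :: ks) ≠ [] := by simp
    -- min(d.keys()) is the head of the sorted key list
    have hmin : (rest.map Prod.fst).foldl min p.1 = k := by
      have hminmem : (rest.map Prod.fst).foldl min p.1 ∈ (p :: rest).map Prod.fst := by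
        rcases PySem.List.foldl_min_mem (rest.map Prod.fst) p.1 with h | h
        · rw [h]; simp
        · simp only [List.map_cons]; exact List.mem_cons_of_mem _ h
      have hminle : (rest.map Prod.fst).foldl min p.1 ≤ k := by
        have hk : k ∈ (p :: rest).map Prod.fst := (hmem_iff k).mp (by simp)
        simp only [List.map_cons, List.mem_cons] at hk
        rcases hk with h | h
        · rw [← h]; exact (PySem.List.foldl_min_le _ _).1
        · exact (PySem.List.foldl_min_le _ _).2 _ h
      have hkle : k ≤ (rest.map Prod.fst).foldl min p.1 :=
        PySem.List.key_head_sorted_le _ (fun x => x) hs _ hminmem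
      omega
    -- max(d.keys()) is the last of the sorted key list
    have hmax : (rest.map Prod.fst).foldl max p.1 = (k :: ks).getLast hLne := by
      have hmaxmem : (rest.map Prod.fst).foldl max p.1 ∈ (p :: rest).map Prod.fst := by
        rcases PySem.List.foldl_max_mem (rest.map Prod.fst) p.1 with h | h
        · rw [h]; simp
        · simp only [List.map_cons]; exact List.mem_cons_of_mem _ h
      have h1 : (rest.map Prod.fst).foldl max p.1 ≤ (k :: ks).getLast hLne :=
        fg_le_getLast _ hple _ ((hmem_iff _).mpr hmaxmem) hLne
      have hlastmem : (k :: ks).getLast hLne ∈ (p :: rest).map Prod.fst :=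
        (hmem_iff _).mp (List.getLast_mem hLne)
      have h2 : (k :: ks).getLast hLne ≤ (rest.map Prod.fst).foldl max p.1 := by
        simp only [List.map_cons, List.mem_cons] at hlastmem
        rcases hlastmem with h | h
        · rw [h]; exact (PySem.List.le_foldl_max _ _).1
        · exact (PySem.List.le_foldl_max _ _).2 _ h
      omega
    have hcontains : ∀ x ∈ k :: ks, (PySem.Dict.mk (p :: rest)).contains x = true := by
      intro x hx
      rw [PySem.Dict.contains_iff_mem_keys]
      simp only [PySem.Dict.keys]
      exact (hmem_iff x).mp hx
    have hcov : ∀ j : Int, k ≤ j → j < (k :: ks).getLast hLne + 1 →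
        (PySem.Dict.mk (p :: rest)).contains j = true → j ∈ k :: ks := by
      intro j _ _ hj
      rw [PySem.Dict.contains_iff_mem_keys] at hj
      simp only [PySem.Dict.keys] at hj
      exact (hmem_iff j).mpr hj
    have hltE : ∀ x ∈ k :: ks, x < (k :: ks).getLast hLne + 1 := by
      intro x hx
      have := fg_le_getLast _ hple _ hx hLne
      omega
    rw [hs, hmin, hmax]
    rw [fg_fillA_main (PySem.Dict.mk (p :: rest)) ((k :: ks).getLast hLne + 1) ks k
        hplt hcontains hcov hltE PySem.Dict.empty none (by simp [PySem.Dict.keys, PySem.Dict.empty])]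
    rw [PySem.List.slice_from_one, PySem.List.pyGetD_neg_one (k :: ks) 0 hLne]
    show _ = (((k :: ks).zip (ks ++ [(k :: ks).getLast hLne + 1])).foldl
        (fgStepB (PySem.Dict.mk (p :: rest))) PySem.Dict.empty).items
    rw [fg_fillB_main (PySem.Dict.mk (p :: rest)) ((k :: ks).getLast hLne + 1) ks k
        hplt hltE PySem.Dict.empty (by simp [PySem.Dict.keys, PySem.Dict.empty])]
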